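-- pv_equiv track=rewrite | github.com/apavlyk/python_stuff | hosts_file.py | __remove_already_existing_records_from_input_data
-- ===== SOURCE A (Python) =====
-- def __remove_already_existing_records_from_input_data(initial_data,
--                                                       data_to_add):
--     """
--     # Method to compare initial hosts file content and data which are going
--     # to be added to hosts file
--     # Method returns dictionary with ip address, host name pairs which have
--     # not existed in hosts file yet.
--     """
--     coinciding_data = {}
--     actual_input_data = {}
--     if not initial_data:
--         actual_input_data = data_to_add
--     else:
--         for ip_address, host_name in data_to_add.items():
--             if ip_address in initial_data:
--                 if initial_data[ip_address] == host_name: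
--                     coinciding_data[ip_address] = host_name
--         if coinciding_data:
--             for ip_address, host_name in data_to_add.items():
--                 if ip_address not in coinciding_data:
--                     actual_input_data[ip_address] = host_name
--         else:
--             actual_input_data = data_to_add
--
--     return actual_input_data
-- ===== SOURCE B (Python) =====
-- def __remove_already_existing_records_from_input_data(initial_data,
--                                                       data_to_add):
--     """One-pass dict comprehension: keep a record unless initial_data
--     already maps its ip to the identical host name."""
--     return {ip: hn for ip, hn in data_to_add.items()
--             if initial_data.get(ip) != hn}
-- ===== Notes on version B (the rewrite author's own statement) =====
-- stated objective: idiomatic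
-- what changed: Replaced the two-pass build-coinciding-dict-then-copy loop (with its empty-initial-data and empty-coinciding special-case branches) by a single dict comprehension that keeps each record unless initial_data already maps its ip to the identical host name.
import Mathlib
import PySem

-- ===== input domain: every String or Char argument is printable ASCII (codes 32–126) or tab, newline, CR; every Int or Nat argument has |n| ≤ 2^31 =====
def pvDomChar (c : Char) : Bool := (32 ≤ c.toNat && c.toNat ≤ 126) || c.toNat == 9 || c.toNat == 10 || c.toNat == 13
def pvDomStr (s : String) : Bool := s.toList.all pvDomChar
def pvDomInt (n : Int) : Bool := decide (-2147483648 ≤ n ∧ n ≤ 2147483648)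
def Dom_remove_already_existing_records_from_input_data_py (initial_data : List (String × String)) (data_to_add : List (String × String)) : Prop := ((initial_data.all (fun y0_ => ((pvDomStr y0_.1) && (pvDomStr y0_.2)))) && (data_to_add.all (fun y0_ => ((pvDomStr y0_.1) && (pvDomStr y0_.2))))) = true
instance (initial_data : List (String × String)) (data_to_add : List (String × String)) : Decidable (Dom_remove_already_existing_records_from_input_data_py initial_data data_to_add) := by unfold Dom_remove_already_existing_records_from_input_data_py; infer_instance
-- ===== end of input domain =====

-- B replaces A's two-pass build-coinciding-dict-then-copy (and its special-case branches)
-- by one pass keeping each record unless initial_data already maps its ip to the same host name (idiomatic).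

-- ===== PORT A =====
def remove_already_existing_records_from_input_data_py (initial_data : List (String × String)) (data_to_add : List (String × String)) : List (String × String) :=
  if initial_data = [] then
    data_to_add
  else
    let coinciding_data : PySem.Dict String String :=
      data_to_add.foldl (fun d p =>
        if (initial_data.lookup p.1).isSome then
          if initial_data.lookup p.1 = some p.2 then d.insert p.1 p.2 else d
        else d) PySem.Dict.empty
    if coinciding_data.items ≠ [] then
      (data_to_add.foldl (fun d p =>
        if coinciding_data.contains p.1 = false then d.insert p.1 p.2 else d)
        PySem.Dict.empty).items
    else data_to_add

-- ===== PORT B =====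
def remove_already_existing_records_from_input_data_py_alt (initial_data : List (String × String)) (data_to_add : List (String × String)) : List (String × String) :=
  (data_to_add.foldl (fun d p =>
    if initial_data.lookup p.1 ≠ some p.2 then d.insert p.1 p.2 else d)
    PySem.Dict.empty).items

-- ===== PRECONDITION & SPEC =====
-- data_to_add stands for a Python dict, whose keys are unique; duplicate-key association
-- lists do not correspond to any Python input, so Pre_ requires the keys to be distinct.
def Pre_remove_already_existing_records_from_input_data_py (initial_data : List (String × String)) (data_to_add : List (String × String)) : Prop :=
  (data_to_add.map Prod.fst).Nodup
instance (initial_data : List (String × String)) (data_to_add : List (String × String)) : Decidable (Pre_remove_already_existing_records_from_input_data_py initial_data data_to_add) := by unfold Pre_remove_already_existing_records_from_input_data_py; infer_instance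

def pvWitness_remove_already_existing_records_from_input_data_py : (List (String × String)) × (List (String × String)) :=
  ([("1.1.1.1", "alpha")], [("1.1.1.1", "alpha"), ("2.2.2.2", "beta")])

def Spec_remove_already_existing_records_from_input_data_py (initial_data : List (String × String)) (data_to_add : List (String × String)) (out : List (String × String)) : Prop := out = remove_already_existing_records_from_input_data_py_alt initial_data data_to_add
instance (initial_data : List (String × String)) (data_to_add : List (String × String)) (out : List (String × String)) : Decidable (Spec_remove_already_existing_records_from_input_data_py initial_data data_to_add out) := by unfold Spec_remove_already_existing_records_from_input_data_py; infer_instance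

-- ===== CLAIM (what is proved, stated in full; the proofs are below) =====
def Claim_equal_remove_already_existing_records_from_input_data_py : Prop := ∀ (initial_data : List (String × String)) (data_to_add : List (String × String)), Dom_remove_already_existing_records_from_input_data_py initial_data data_to_add → Pre_remove_already_existing_records_from_input_data_py initial_data data_to_add → Spec_remove_already_existing_records_from_input_data_py initial_data data_to_add (remove_already_existing_records_from_input_data_py initial_data data_to_add)

-- ===== LEMMAS AND PROOFS =====

-- A's nested membership-then-value test collapses to the single value test.
theorem bodyA_eq (initial_data : List (String × String)) (d : PySem.Dict String String) (p : String × String) :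
    (if (initial_data.lookup p.1).isSome then
       if initial_data.lookup p.1 = some p.2 then d.insert p.1 p.2 else d
     else d)
    = (if initial_data.lookup p.1 = some p.2 then d.insert p.1 p.2 else d) := by
  by_cases h : initial_data.lookup p.1 = some p.2
  · simp [h]
  · simp [h]

-- A conditional-insert fold over fresh distinct keys appends exactly the filtered pairs.
theorem foldl_filter_items (c : String × String → Prop) [DecidablePred c] :
    ∀ (l : List (String × String)) (d : PySem.Dict String String),
      (∀ p ∈ l, d.contains p.1 = false) → (l.map Prod.fst).Nodup →
      (l.foldl (fun d p => if c p then d.insert p.1 p.2 else d) d).items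
        = d.items ++ l.filter (fun p => decide (c p)) := by
  intro l
  induction l with
  | nil => intro d _ _; simp
  | cons p l ih =>
    intro d hfresh hnd
    simp only [List.map_cons, List.nodup_cons] at hnd
    have hpfresh : d.contains p.1 = false := hfresh p (List.mem_cons_self ..)
    by_cases hc : c p
    · have hins : ∀ q ∈ l, (d.insert p.1 p.2).contains q.1 = false := by
        intro q hq
        rw [PySem.Dict.contains_insert]
        have hne : q.1 ≠ p.1 := fun h => hnd.1 (h ▸ List.mem_map_of_mem hq)
        simp [hne, hfresh q (List.mem_cons_of_mem _ hq)]
      simp only [List.foldl_cons, if_pos hc]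
      rw [ih _ hins hnd.2, PySem.Dict.items_insert_of_not_contains _ _ hpfresh]
      simp [hc]
    · simp only [List.foldl_cons, if_neg hc]
      rw [ih _ (fun q hq => hfresh q (List.mem_cons_of_mem _ hq)) hnd.2]
      simp [hc]

theorem main_equiv (initial_data data_to_add : List (String × String))
    (hpre : (data_to_add.map Prod.fst).Nodup) :
    remove_already_existing_records_from_input_data_py initial_data data_to_add
      = remove_already_existing_records_from_input_data_py_alt initial_data data_to_add := by
  have hemp : (PySem.Dict.empty : PySem.Dict String String).items = [] := rfl
  unfold remove_already_existing_records_from_input_data_py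
  unfold remove_already_existing_records_from_input_data_py_alt
  have hB := foldl_filter_items (fun p => initial_data.lookup p.1 ≠ some p.2) data_to_add
      PySem.Dict.empty (by simp) hpre
  rw [hemp, List.nil_append] at hB
  by_cases hinit : initial_data = []
  · rw [if_pos hinit, hB]
    subst hinit
    rw [List.filter_eq_self.mpr (by intro p _; simp [List.lookup])]
  · rw [if_neg hinit]
    simp only [bodyA_eq]
    set C : PySem.Dict String String :=
      data_to_add.foldl (fun d p =>
        if initial_data.lookup p.1 = some p.2 then d.insert p.1 p.2 else d)
        PySem.Dict.empty with hCdef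
    have hCitems : C.items
        = data_to_add.filter (fun p => decide (initial_data.lookup p.1 = some p.2)) := by
      rw [hCdef, foldl_filter_items (fun p => initial_data.lookup p.1 = some p.2) data_to_add
        PySem.Dict.empty (by simp) hpre, hemp, List.nil_append]
    have hcont : ∀ p ∈ data_to_add,
        C.contains p.1 = decide (initial_data.lookup p.1 = some p.2) := by
      intro p hp
      by_cases hl : initial_data.lookup p.1 = some p.2
      · have hmemf : p ∈ data_to_add.filter
            (fun p => decide (initial_data.lookup p.1 = some p.2)) :=
          List.mem_filter.mpr ⟨hp, by simp [hl]⟩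
        have hk : p.1 ∈ C.keys := by
          simp only [PySem.Dict.keys, hCitems]
          exact List.mem_map_of_mem hmemf
        simp [hl, (PySem.Dict.contains_iff_mem_keys C p.1).mpr hk]
      · cases hcb : C.contains p.1 with
        | false => simp [hl]
        | true =>
          exfalso
          have hmem : p.1 ∈ C.keys := (PySem.Dict.contains_iff_mem_keys C p.1).mp hcb
          simp only [PySem.Dict.keys, hCitems] at hmem
          obtain ⟨q, hq, hq1⟩ := List.mem_map.mp hmem
          obtain ⟨hqd, hqf⟩ := List.mem_filter.mp hq
          have hqp : q = p := List.inj_on_of_nodup_map hpre hqd hp hq1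
          exact hl (by simpa [hqp] using hqf)
    have hA2 := foldl_filter_items (fun p => C.contains p.1 = false) data_to_add
        PySem.Dict.empty (by simp) hpre
    rw [hemp, List.nil_append] at hA2
    by_cases hne : C.items = []
    · rw [if_neg (not_not_intro hne), hB]
      rw [List.filter_eq_self.mpr ?_]
      intro p hp
      have := List.filter_eq_nil_iff.mp (hCitems ▸ hne) p hp
      simpa using this
    · rw [if_pos hne, hA2, hB]
      refine List.filter_congr ?_
      intro x hx
      by_cases hl : initial_data.lookup x.1 = some x.2 <;> simp [hcont x hx, hl]

-- ===== VERDICT (by name: the statement is the Claim_ definition above) =====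
theorem remove_already_existing_records_from_input_data_py_spec : Claim_equal_remove_already_existing_records_from_input_data_py := by
  intro initial_data data_to_add _ hpre
  exact main_equiv initial_data data_to_add hpre
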